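-- pv_equiv track=rewrite | github.com/drussell23/JARVIS | backend/core/ouroboros/governance/governed_loop_service.py | _infer_canary_slice
-- ===== SOURCE A (Python) =====
-- def _infer_canary_slice(target_files: tuple) -> str:
--     """Derive the most restrictive canary slice from target file paths.
--
--     Checks all files and returns the most constrained slice:
--     - "tests/" and "docs/" → GOVERNED (lowest restriction)
--     - "backend/core/" → OBSERVE
--     - "" (root default) → OBSERVE
--
--     When files span multiple slices, returns the most restrictive.
--     """
--     # Ordered from most restrictive to least restrictive
--     _SLICE_ORDER = ["backend/core/", "", "tests/", "docs/"]
--     found: set = set()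
--     for fp in target_files:
--         fp_norm = fp.replace("\\", "/").lstrip("./")
--         if fp_norm.startswith("tests/"):
--             found.add("tests/")
--         elif fp_norm.startswith("docs/"):
--             found.add("docs/")
--         elif fp_norm.startswith("backend/core/"):
--             found.add("backend/core/")
--         else:
--             found.add("")
--     if not found:
--         return ""
--     # Return most restrictive: OBSERVE slices (backend/core/, "") beat GOVERNED slices
--     for s in _SLICE_ORDER:
--         if s in found:
--             return s
--     return ""
-- ===== SOURCE B (Python) =====
-- def _infer_canary_slice(target_files: tuple) -> str:
--     """Normalize once, then short-circuit scans in restriction order: the answer is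
--     the first slice whose class of paths is present."""
--     norm = [fp.replace("\\", "/").lstrip("./") for fp in target_files]
--     if not norm:
--         return ""
--     if any(p.startswith("backend/core/") for p in norm):
--         return "backend/core/"
--     if any(not p.startswith("tests/") and not p.startswith("docs/") for p in norm):
--         return ""
--     if any(p.startswith("tests/") for p in norm):
--         return "tests/"
--     return "docs/"
-- ===== Notes on version B (the rewrite author's own statement) =====
-- stated objective: simpler
-- what changed: Replaced A's per-element classification into an intermediate set plus a second scan over the slice-order list with a staged search: normalize all paths once, then short-circuiting any() scans in restriction order return the first slice whose class of paths is present.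
import Mathlib
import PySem

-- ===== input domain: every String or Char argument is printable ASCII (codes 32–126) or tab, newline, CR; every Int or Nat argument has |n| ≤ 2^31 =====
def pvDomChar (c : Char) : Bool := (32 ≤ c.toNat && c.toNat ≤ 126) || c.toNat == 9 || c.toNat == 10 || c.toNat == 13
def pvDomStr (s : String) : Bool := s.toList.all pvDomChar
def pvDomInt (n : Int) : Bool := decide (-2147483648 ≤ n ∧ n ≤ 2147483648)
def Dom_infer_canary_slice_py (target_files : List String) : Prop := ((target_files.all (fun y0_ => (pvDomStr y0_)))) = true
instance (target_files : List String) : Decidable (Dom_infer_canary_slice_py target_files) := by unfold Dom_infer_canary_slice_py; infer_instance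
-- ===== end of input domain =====

-- B (simpler): normalize once, then short-circuit scans in restriction order, instead of A's
-- per-element classification into a set followed by a scan over the slice-order list.

-- ===== PORT A =====
-- fp.replace("\\", "/").lstrip("./"): lstrip(chars) drops leading chars from the set {'.','/'},
-- which is exactly List.dropWhile on that character test (exact; identical line in both Pythons).
def pvNorm (fp : String) : List Char :=
  (PySem.Chars.replace fp.toList ['\\'] ['/']).dropWhile (fun c => c == '.' || c == '/')

-- A's final loop 'for s in _SLICE_ORDER: if s in found: return s' with its trailing 'return ""'
def pvFirstIn : List String → PySem.Set String → String
  | [], _ => ""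
  | s :: rest, found => if s ∈ found then s else pvFirstIn rest found

def infer_canary_slice_py (target_files : List String) : String :=
  let sliceOrder : List String := ["backend/core/", "", "tests/", "docs/"]
  let found : PySem.Set String := target_files.foldl (fun f fp =>
    let fp_norm := pvNorm fp
    if PySem.Chars.startswith fp_norm "tests/".toList then PySem.Set.add f "tests/"
    else if PySem.Chars.startswith fp_norm "docs/".toList then PySem.Set.add f "docs/"
    else if PySem.Chars.startswith fp_norm "backend/core/".toList then PySem.Set.add f "backend/core/"
    else PySem.Set.add f "") PySem.Set.empty
  if found.isEmpty then ""
  else pvFirstIn sliceOrder found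

-- ===== PORT B =====
def infer_canary_slice_py_alt (target_files : List String) : String :=
  let norm := target_files.map pvNorm
  if norm.isEmpty then ""
  else if norm.any (fun p => PySem.Chars.startswith p "backend/core/".toList) then "backend/core/"
  else if norm.any (fun p => !(PySem.Chars.startswith p "tests/".toList)
                          && !(PySem.Chars.startswith p "docs/".toList)) then ""
  else if norm.any (fun p => PySem.Chars.startswith p "tests/".toList) then "tests/"
  else "docs/"

-- ===== PRECONDITION & SPEC =====
def Spec_infer_canary_slice_py (target_files : List String) (out : String) : Prop := out = infer_canary_slice_py_alt target_files
instance (target_files : List String) (out : String) : Decidable (Spec_infer_canary_slice_py target_files out) := by unfold Spec_infer_canary_slice_py; infer_instance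

-- ===== CLAIM (what is proved, stated in full; the proofs are below) =====
def Claim_equal_infer_canary_slice_py : Prop := ∀ (target_files : List String), Dom_infer_canary_slice_py target_files → Spec_infer_canary_slice_py target_files (infer_canary_slice_py target_files)

-- ===== LEMMAS AND PROOFS =====

def pvT (p : List Char) : Bool := PySem.Chars.startswith p "tests/".toList
def pvD (p : List Char) : Bool := PySem.Chars.startswith p "docs/".toList
def pvB (p : List Char) : Bool := PySem.Chars.startswith p "backend/core/".toList

-- the slice A's loop body adds for a path whose normalized form is p
def pvClass (p : List Char) : String :=
  if pvT p then "tests/" else if pvD p then "docs/" else if pvB p then "backend/core/" else ""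

def pvStepA (f : PySem.Set String) (fp : String) : PySem.Set String :=
  let fp_norm := pvNorm fp
  if PySem.Chars.startswith fp_norm "tests/".toList then PySem.Set.add f "tests/"
  else if PySem.Chars.startswith fp_norm "docs/".toList then PySem.Set.add f "docs/"
  else if PySem.Chars.startswith fp_norm "backend/core/".toList then PySem.Set.add f "backend/core/"
  else PySem.Set.add f ""

lemma pvStepA_eq (f : PySem.Set String) (fp : String) :
    pvStepA f fp = PySem.Set.add f (pvClass (pvNorm fp)) := by
  unfold pvStepA pvClass pvT pvD pvB; dsimp only; split_ifs <;> rfl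

-- the three prefixes are mutually exclusive (their first characters differ)
lemma pv_excl (p : List Char) :
    (pvT p = true → pvD p = false ∧ pvB p = false) ∧ (pvD p = true → pvB p = false) := by
  have htl : "tests/".toList = ['t','e','s','t','s','/'] := by decide
  have hdl : "docs/".toList = ['d','o','c','s','/'] := by decide
  have hbl : "backend/core/".toList = ['b','a','c','k','e','n','d','/','c','o','r','e','/'] := by decide
  unfold pvT pvD pvB
  rw [htl, hdl, hbl]
  cases p with
  | nil =>
      constructor
      · intro h; rw [PySem.Chars.startswith_iff] at h; exact absurd h (by decide)
      · intro h; rw [PySem.Chars.startswith_iff] at h; exact absurd h (by decide)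
  | cons c cs =>
      constructor
      · intro h
        rw [PySem.Chars.startswith_iff, List.cons_prefix_cons] at h
        obtain ⟨hc, -⟩ := h
        constructor <;>
        · rw [Bool.eq_false_iff]
          intro h2
          rw [PySem.Chars.startswith_iff, List.cons_prefix_cons] at h2
          obtain ⟨hc2, -⟩ := h2
          rw [← hc] at hc2
          exact absurd hc2 (by decide)
      · intro h
        rw [PySem.Chars.startswith_iff, List.cons_prefix_cons] at h
        obtain ⟨hc, -⟩ := h
        rw [Bool.eq_false_iff]
        intro h2
        rw [PySem.Chars.startswith_iff, List.cons_prefix_cons] at h2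
        obtain ⟨hc2, -⟩ := h2
        rw [← hc] at hc2
        exact absurd hc2 (by decide)

lemma pvClass_B {p : List Char} (h : pvB p = true) : pvClass p = "backend/core/" := by
  have he := pv_excl p
  unfold pvClass
  by_cases hT : pvT p = true
  · exact absurd h (by simp [(he.1 hT).2])
  · by_cases hD : pvD p = true
    · exact absurd h (by simp [he.2 hD])
    · simp [hT, hD, h]

lemma pvClass_ne_B {p : List Char} (h : pvB p = false) : pvClass p ≠ "backend/core/" := by
  unfold pvClass; split_ifs <;> simp_all

lemma pvClass_other {p : List Char} (hT : pvT p = false) (hD : pvD p = false)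
    (hB : pvB p = false) : pvClass p = "" := by
  unfold pvClass; simp [hT, hD, hB]

lemma pvClass_ne_empty {p : List Char} (h : ¬ (pvT p = false ∧ pvD p = false)) : pvClass p ≠ "" := by
  unfold pvClass
  split_ifs with h1 h2 h3 <;> simp_all

lemma pvClass_T {p : List Char} (h : pvT p = true) : pvClass p = "tests/" := by
  unfold pvClass; simp [h]

lemma pvClass_ne_T {p : List Char} (h : pvT p = false) : pvClass p ≠ "tests/" := by
  unfold pvClass; split_ifs <;> simp_all

lemma pvClass_D {p : List Char} (hT : pvT p = false) (hD : pvD p = true) : pvClass p = "docs/" := by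
  unfold pvClass; simp [hT, hD]

-- membership in A's accumulated set
lemma pv_mem_foldl (tfs : List String) :
    ∀ (f : PySem.Set String) (s : String),
      (s ∈ tfs.foldl pvStepA f ↔ s ∈ f ∨ ∃ fp ∈ tfs, s = pvClass (pvNorm fp)) := by
  induction tfs with
  | nil => intro f s; simp
  | cons x xs ih =>
      intro f s
      simp only [List.foldl_cons, pvStepA_eq]
      rw [ih]
      rw [PySem.Set.mem_add]
      constructor
      · rintro (⟨h | h⟩ | ⟨fp, hfp, hs⟩)
        · exact Or.inl h
        · exact Or.inr ⟨x, by simp, h⟩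
        · exact Or.inr ⟨fp, by simp [hfp], hs⟩
      · rintro (h | ⟨fp, hfp, hs⟩)
        · exact Or.inl (Or.inl h)
        · rcases List.mem_cons.1 hfp with rfl | hmem
          · exact Or.inl (Or.inr hs)
          · exact Or.inr ⟨fp, hmem, hs⟩

lemma pv_mem_found (tfs : List String) (s : String) :
    s ∈ tfs.foldl pvStepA PySem.Set.empty ↔ ∃ fp ∈ tfs, s = pvClass (pvNorm fp) := by
  rw [pv_mem_foldl]
  constructor
  · rintro (h | h)
    · cases h
    · exact h
  · exact Or.inr

lemma pv_found_nonempty (x : String) (xs : List String) :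
    ((x :: xs).foldl pvStepA PySem.Set.empty).isEmpty = false := by
  have hm : pvClass (pvNorm x) ∈ (x :: xs).foldl pvStepA PySem.Set.empty :=
    (pv_mem_found _ _).2 ⟨x, by simp, rfl⟩
  cases hf : (x :: xs).foldl pvStepA PySem.Set.empty with
  | nil => rw [hf] at hm; cases hm
  | cons a l => simp

-- ===== VERDICT (by name: the statement is the Claim_ definition above) =====
theorem infer_canary_slice_py_spec : Claim_equal_infer_canary_slice_py := by
  intro tfs _
  unfold Spec_infer_canary_slice_py infer_canary_slice_py infer_canary_slice_py_alt
  simp only [List.isEmpty_map, List.any_map, Function.comp_def]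
  cases tfs with
  | nil => rfl
  | cons x xs =>
      have hfold : (x :: xs).foldl (fun f fp =>
          let fp_norm := pvNorm fp
          if PySem.Chars.startswith fp_norm "tests/".toList then PySem.Set.add f "tests/"
          else if PySem.Chars.startswith fp_norm "docs/".toList then PySem.Set.add f "docs/"
          else if PySem.Chars.startswith fp_norm "backend/core/".toList then PySem.Set.add f "backend/core/"
          else PySem.Set.add f "") PySem.Set.empty = (x :: xs).foldl pvStepA PySem.Set.empty := rfl
      rw [hfold, pv_found_nonempty x xs]
      simp only [List.isEmpty_cons, Bool.false_eq_true, if_false]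
      set tfs := x :: xs
      set found := tfs.foldl pvStepA PySem.Set.empty with hfound
      by_cases hB : tfs.any (fun fp => PySem.Chars.startswith (pvNorm fp) "backend/core/".toList) = true
      · -- some path is backend/core/: both return "backend/core/"
        rw [hB]
        rcases List.any_eq_true.1 hB with ⟨fp, hfp, hb⟩
        have hmem : "backend/core/" ∈ found :=
          (pv_mem_found _ _).2 ⟨fp, hfp, (pvClass_B (p := pvNorm fp) hb).symm⟩
        simp [pvFirstIn, hmem]
      · rw [Bool.eq_false_iff.2 hB]
        have hBall : ∀ fp ∈ tfs, pvB (pvNorm fp) = false := by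
          intro fp hfp
          by_contra hc
          exact hB (List.any_eq_true.2 ⟨fp, hfp, by revert hc; unfold pvB; cases PySem.Chars.startswith (pvNorm fp) "backend/core/".toList <;> simp⟩)
        have hnomemB : "backend/core/" ∉ found := by
          intro hm
          rcases (pv_mem_found _ _).1 hm with ⟨fp, hfp, hs⟩
          exact pvClass_ne_B (hBall fp hfp) hs.symm
        by_cases hO : tfs.any (fun fp => !(PySem.Chars.startswith (pvNorm fp) "tests/".toList)
                          && !(PySem.Chars.startswith (pvNorm fp) "docs/".toList)) = true
        · -- some path is neither tests/ nor docs/ (nor backend): both return ""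
          rw [hO]
          rcases List.any_eq_true.1 hO with ⟨fp, hfp, hb⟩
          simp only [Bool.and_eq_true, Bool.not_eq_eq_eq_not, Bool.not_true] at hb
          have hmem : "" ∈ found :=
            (pv_mem_found _ _).2 ⟨fp, hfp, (pvClass_other (p := pvNorm fp) hb.1 hb.2 (hBall fp hfp)).symm⟩
          simp [pvFirstIn, hnomemB, hmem]
        · rw [Bool.eq_false_iff.2 hO]
          have hOall : ∀ fp ∈ tfs, ¬ (pvT (pvNorm fp) = false ∧ pvD (pvNorm fp) = false) := by
            intro fp hfp hc
            exact hO (List.any_eq_true.2 ⟨fp, hfp, by unfold pvT pvD at hc; rw [hc.1, hc.2]; rfl⟩)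
          have hnomemO : "" ∉ found := by
            intro hm
            rcases (pv_mem_found _ _).1 hm with ⟨fp, hfp, hs⟩
            exact pvClass_ne_empty (hOall fp hfp) hs.symm
          by_cases hT : tfs.any (fun fp => PySem.Chars.startswith (pvNorm fp) "tests/".toList) = true
          · -- a tests/ path is present: both return "tests/"
            rw [hT]
            rcases List.any_eq_true.1 hT with ⟨fp, hfp, hb⟩
            have hmem : "tests/" ∈ found :=
              (pv_mem_found _ _).2 ⟨fp, hfp, (pvClass_T (p := pvNorm fp) hb).symm⟩
            simp [pvFirstIn, hnomemB, hnomemO, hmem]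
          · -- all paths are docs/: both return "docs/"
            rw [Bool.eq_false_iff.2 hT]
            have hTall : ∀ fp ∈ tfs, pvT (pvNorm fp) = false := by
              intro fp hfp
              by_contra hc
              exact hT (List.any_eq_true.2 ⟨fp, hfp, by revert hc; unfold pvT; cases PySem.Chars.startswith (pvNorm fp) "tests/".toList <;> simp⟩)
            have hnomemT : "tests/" ∉ found := by
              intro hm
              rcases (pv_mem_found _ _).1 hm with ⟨fp, hfp, hs⟩
              exact pvClass_ne_T (hTall fp hfp) hs.symm
            have hmem : "docs/" ∈ found := by
              refine (pv_mem_found _ _).2 ⟨x, by simp [tfs], ?_⟩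
              have hx : x ∈ tfs := by simp [tfs]
              have hTx := hTall x hx
              have hDx : pvD (pvNorm x) = true := by
                by_contra hc
                exact hOall x hx ⟨hTx, Bool.eq_false_iff.2 hc⟩
              exact (pvClass_D hTx hDx).symm
            simp [pvFirstIn, hnomemB, hnomemO, hnomemT, hmem]
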